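-- pv_equiv track=rewrite | github.com/cas1m1r/MythMachina | main.py | find_occurences
-- ===== SOURCE A (Python) =====
-- def find_occurences(pattern, text):
-- 	indices = []
-- 	start_index = 0
-- 	finds = []
-- 	while True:
-- 	    index = text.find(pattern, start_index)
-- 	    if index == -1:
-- 	        break
-- 	    indices.append(index)
-- 	    if start_index !=0:
-- 		    finds.append(text[start_index:index])
-- 	    start_index = index + len(pattern)
--
-- 	return finds
-- ===== SOURCE B (Python) =====
-- def find_occurences(pattern, text):
--     m = len(pattern)
--     # all positions where pattern matches, by direct slice comparison
--     hits = [i for i in range(len(text) - m + 1) if text[i:i + m] == pattern]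
--     # greedily keep the non-overlapping ones, left to right
--     kept = []
--     end = 0
--     for i in hits:
--         if i >= end:
--             kept.append(i)
--             end = i + m
--     # the text between each pair of consecutive kept occurrences
--     return [text[i + m:j] for i, j in zip(kept, kept[1:])]
-- ===== Notes on version B (the rewrite author's own statement) =====
-- stated objective: alternative
-- what changed: Replaces the stateful str.find/advance loop with three staged passes: enumerate every matching position by direct slice comparison over range(len(text)-m+1), greedily filter them to the non-overlapping subsequence, then map consecutive pairs to the between-segments; Pre_ excludes pattern == '' on which A loops forever while B returns.
-- outside the precondition, e.g. on find_occurences('', 'abc'): A does not finish within the time limit, B returns ['a', 'b', 'c']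
import Mathlib
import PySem

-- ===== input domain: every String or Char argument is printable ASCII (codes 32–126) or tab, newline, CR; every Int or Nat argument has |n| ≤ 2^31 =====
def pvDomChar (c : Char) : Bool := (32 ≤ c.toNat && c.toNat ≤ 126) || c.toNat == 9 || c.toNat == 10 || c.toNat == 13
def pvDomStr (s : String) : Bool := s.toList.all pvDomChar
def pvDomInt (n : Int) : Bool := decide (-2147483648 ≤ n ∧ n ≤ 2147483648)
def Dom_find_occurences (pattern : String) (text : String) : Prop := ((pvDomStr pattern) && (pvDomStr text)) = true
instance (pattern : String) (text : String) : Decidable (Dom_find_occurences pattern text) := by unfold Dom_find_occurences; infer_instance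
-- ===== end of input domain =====

-- B replaces A's stateful str.find/advance loop by three staged passes: enumerate every
-- matching position by direct slice comparison, greedily keep the non-overlapping ones,
-- then map consecutive pairs to the between-segments (objective: alternative algorithm).


-- ===== PORT A =====
-- A's `while True` loop; with a nonempty pattern start_index grows by ≥ 1 each step and never
-- exceeds len(text), so fuel text.length + 1 never runs out (Python loops forever on pattern = "").
def find_occurencesGo (pattern text : String) (fuel : Nat) (start_index : Int)
    (indices : List Int) (finds : List String) : List String :=
  match fuel with
  | 0 => finds
  | Nat.succ fuel =>
    let index := PySem.Str.findFrom text pattern start_index none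
    if index = -1 then finds
    else
      let indices' := indices ++ [index]
      let finds' := if start_index ≠ 0
        then finds ++ [PySem.Str.slice text (some start_index) (some index)]
        else finds
      find_occurencesGo pattern text fuel (index + PySem.Str.len pattern) indices' finds'

def find_occurences (pattern : String) (text : String) : List String :=
  find_occurencesGo pattern text (text.toList.length + 1) 0 [] []

-- ===== PORT B =====
-- Source B: all matching positions by slice comparison, greedy non-overlapping filter, then
-- the segments between consecutive kept occurrences.
def find_occurences_alt (pattern : String) (text : String) : List String :=
  let m : Int := PySem.Str.len pattern
  let hits := (PySem.List.pyRange 0 (PySem.Str.len text - m + 1) 1).filter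
    (fun i => PySem.Str.slice text (some i) (some (i + m)) == pattern)
  let kept := (hits.foldl (fun (st : List Int × Int) i =>
      if st.2 ≤ i then (st.1 ++ [i], i + m) else st) ([], 0)).1
  (kept.zip kept.tail).map
    (fun p => PySem.Str.slice text (some (p.1 + m)) (some p.2))

-- ===== PRECONDITION & SPEC =====
-- Pre_ excludes pattern = "", on which the Python A loops forever (it never returns there).
def Pre_find_occurences (pattern : String) (text : String) : Prop := pattern ≠ ""
instance (pattern : String) (text : String) : Decidable (Pre_find_occurences pattern text) := by
  unfold Pre_find_occurences; infer_instance

def pvWitness_find_occurences : String × String := ("ab", "xabyabzab")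

def Spec_find_occurences (pattern : String) (text : String) (out : List String) : Prop :=
  out = find_occurences_alt pattern text
instance (pattern : String) (text : String) (out : List String) :
    Decidable (Spec_find_occurences pattern text out) := by
  unfold Spec_find_occurences; infer_instance

-- ===== CLAIM (what is proved, stated in full; the proofs are below) =====
def Claim_equal_find_occurences : Prop := ∀ (pattern : String) (text : String),
  Dom_find_occurences pattern text → Pre_find_occurences pattern text →
  Spec_find_occurences pattern text (find_occurences pattern text)

-- ===== LEMMAS AND PROOFS =====

-- the successive non-overlapping occurrence indices, as A's find/advance loop visits them
def idxSeq (P L : List Char) : Nat → Int → List Int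
  | 0, _ => []
  | Nat.succ fuel, e =>
    let f := PySem.Chars.findFrom L P e
    if f = -1 then [] else f :: idxSeq P L fuel (f + (P.length : Int))

-- the segments between consecutive occurrences, as A's loop produces them
def segsF (pattern text : String) (s : Int) : List Int → List String
  | [] => []
  | j :: js =>
    PySem.Str.slice text (some s) (some j)
      :: segsF pattern text (j + (pattern.toList.length : Int)) js

-- B's greedy pass, as structural recursion
def greedyRec (m : Int) : List Int → Int → List Int
  | [], _ => []
  | h :: hs, e => if e ≤ h then h :: greedyRec m hs (h + m) else greedyRec m hs e

theorem foldl_greedy (m : Int) (hs : List Int) : ∀ (acc : List Int) (e : Int),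
    (hs.foldl (fun (st : List Int × Int) i =>
        if st.2 ≤ i then (st.1 ++ [i], i + m) else st) (acc, e)).1
      = acc ++ greedyRec m hs e := by
  induction hs with
  | nil => intro acc e; simp [greedyRec]
  | cons h hs ih =>
    intro acc e
    simp only [List.foldl_cons, greedyRec]
    by_cases hle : e ≤ h
    · rw [if_pos hle, if_pos hle, ih]; simp
    · rw [if_neg hle, if_neg hle, ih]

theorem segsF_zip (pattern text : String) :
    ∀ (js : List Int) (j : Int),
      segsF pattern text (j + (pattern.toList.length : Int)) js
        = ((j :: js).zip js).map
            (fun p =>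
              PySem.Str.slice text (some (p.1 + (pattern.toList.length : Int))) (some p.2)) := by
  intro js
  induction js with
  | nil => intro j; simp [segsF]
  | cons j1 js ih => intro j; simp only [segsF, List.zip_cons_cons, List.map_cons, ih j1]

-- a found index points at an occurrence, hence advancing lands in (0, text.length]
theorem findFrom_step (pattern text : String) (k : Nat) (hk : k ≤ text.toList.length)
    (hp : pattern.toList ≠ [])
    (h : ¬ PySem.Chars.findFrom text.toList pattern.toList (k : Int) = -1) :
    ∃ m : Nat, PySem.Chars.findFrom text.toList pattern.toList (k : Int) = (m : Int) ∧
      0 < m + pattern.toList.length ∧ m + pattern.toList.length ≤ text.toList.length := by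
  obtain ⟨hle, hpre, -⟩ := PySem.Chars.findFrom_natCast_spec text.toList pattern.toList k hk h
  have hf0 : (0 : Int) ≤ PySem.Chars.findFrom text.toList pattern.toList (k : Int) :=
    le_trans (Int.natCast_nonneg k) hle
  have hplen : 0 < pattern.toList.length := List.length_pos_iff.mpr hp
  have h1 := hpre.length_le
  rw [List.length_drop] at h1
  exact ⟨_, (Int.toNat_of_nonneg hf0).symm, by omega, by omega⟩

-- A's loop result = the pending finds plus the segments between the remaining occurrences
theorem go_eq_segs (pattern text : String) (hp : pattern.toList ≠ []) (fuel : Nat) :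
    ∀ (k : Nat), k ≤ text.toList.length → 0 < k →
      ∀ (indices : List Int) (finds : List String),
        find_occurencesGo pattern text fuel (k : Int) indices finds
          = finds ++ segsF pattern text (k : Int)
              (idxSeq pattern.toList text.toList fuel (k : Int)) := by
  induction fuel with
  | zero => intro k _ _ indices finds; simp [find_occurencesGo, idxSeq, segsF]
  | succ fuel ih =>
    intro k hk hk0 indices finds
    simp only [find_occurencesGo, idxSeq, PySem.Str.findFrom_eq, PySem.Str.len_eq]
    by_cases h : PySem.Chars.findFrom text.toList pattern.toList (k : Int) = -1
    · rw [if_pos h, if_pos h]; simp [segsF]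
    · obtain ⟨m, hm, hpos, hle⟩ := findFrom_step pattern text k hk hp h
      have hkne : ((k : Int)) ≠ 0 := by omega
      rw [if_neg h, if_neg h, if_pos hkne, hm]
      have hcast : ((m : Int) + (pattern.toList.length : Int))
          = ((m + pattern.toList.length : Nat) : Int) := by push_cast; ring
      rw [hcast, ih (m + pattern.toList.length) hle hpos]
      simp only [List.append_assoc, List.singleton_append]
      rw [segsF, hcast]

-- B's greedy pass over the filtered position range = the find/advance occurrence sequence.
-- p is B's match test; hp says what it tests, for in-range positions.
theorem greedy_eq_idxSeq (P L : List Char) (hP : P ≠ []) (p : Int → Bool)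
    (hp : ∀ k : Nat, (k : Int) < (L.length : Int) - P.length + 1 →
        (p (k : Int) = true ↔ P <+: L.drop k)) :
    ∀ (d a e fuel : Nat),
      (((L.length : Int) - P.length + 1) - a).toNat = d → d ≤ fuel →
      e ≤ L.length →
      (∀ i : Nat, e ≤ i → i < a → ¬ P <+: L.drop i) →
      greedyRec (P.length : Int)
          ((PySem.List.pyRange a ((L.length : Int) - P.length + 1) 1).filter p) (e : Int)
        = idxSeq P L fuel (e : Int) := by
  have hm : 0 < P.length := List.length_pos_iff.mpr hP
  intro d
  induction d with
  | zero =>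
    intro a e fuel hd _ he hinv
    have ha : ((L.length : Int) - P.length + 1) ≤ (a : Int) := by omega
    rw [PySem.List.pyRange_one_eq_nil ha]
    simp only [List.filter_nil, greedyRec]
    -- idxSeq is [] because no occurrence remains at or after e
    have hnone : PySem.Chars.findFrom L P (e : Int) = -1 := by
      rw [PySem.Chars.findFrom_natCast_eq_neg_one_iff L P e he]
      intro hinf
      obtain ⟨j, hj⟩ := (PySem.Chars.exists_prefix_drop_iff_isIn P (L.drop e)).mpr
        ((PySem.Chars.isIn_iff_infix P (L.drop e)).mpr hinf)
      rw [List.drop_drop] at hj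
      have hlen := hj.length_le
      rw [List.length_drop] at hlen
      exact hinv (e + j) (by omega) (by omega) hj
    cases fuel with
    | zero => rfl
    | succ fuel => simp [idxSeq, hnone]
  | succ d ih =>
    intro a e fuel hd hfuel he hinv
    have ha : (a : Int) < (L.length : Int) - P.length + 1 := by omega
    have ham : a + P.length ≤ L.length := by omega
    rw [PySem.List.pyRange_one_cons ha]
    by_cases hpa : p (a : Int) = true
    · -- match at a
      have hpre : P <+: L.drop a := (hp a ha).mp hpa
      simp only [List.filter_cons, hpa, if_pos]
      by_cases hea : e ≤ a
      · -- kept: the head IS the next found index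
        have hne : ¬ PySem.Chars.findFrom L P (e : Int) = -1 := by
          rw [PySem.Chars.findFrom_natCast_eq_neg_one_iff L P e he]
          intro hc
          exact hc (List.infix_iff_prefix_suffix.mpr
            ⟨L.drop a, by
              constructor
              · exact hpre
              · rw [show L.drop a = (L.drop e).drop (a - e) by rw [List.drop_drop]; congr 1; omega]
                exact List.drop_suffix _ _⟩)
        obtain ⟨hle, hpf, hmin⟩ := PySem.Chars.findFrom_natCast_spec L P e he hne
        have hf0 : (0 : Int) ≤ PySem.Chars.findFrom L P (e : Int) :=
          le_trans (Int.natCast_nonneg e) hle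
        set f := PySem.Chars.findFrom L P (e : Int) with hfdef
        have hfa : f = (a : Int) := by
          rcases lt_trichotomy f.toNat a with hlt | heq | hgt
          · exact absurd hpf (hinv f.toNat (by omega) hlt)
          · omega
          · exact absurd hpre (hmin a (by exact_mod_cast hea) hgt)
        cases fuel with
        | zero => omega
        | succ fuel =>
          simp only [idxSeq, ← hfdef, hfa]
          simp only [greedyRec, if_pos (show (e : Int) ≤ (a : Int) by exact_mod_cast hea)]
          congr 1
          have hcast : ((a : Int) + (P.length : Int)) = ((a + P.length : Nat) : Int) := by
            push_cast; ring
          rw [hcast]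
          exact ih (a + 1) (a + P.length) fuel (by omega) (by omega) ham
            (fun i h1 h2 => (by omega : False).elim)
      · -- skipped: a < e, head overlaps the previous occurrence
        simp only [greedyRec,
          if_neg (show ¬ (e : Int) ≤ (a : Int) by exact_mod_cast hea)]
        exact ih (a + 1) e fuel (by omega) (by omega) he
          (fun i h1 h2 => by
            rcases Nat.lt_succ_iff_lt_or_eq.mp h2 with h | h
            · exact hinv i h1 h
            · omega)
    · -- no match at a
      simp only [List.filter_cons, hpa, if_neg, Bool.false_eq_true, not_false_iff]
      exact ih (a + 1) e fuel (by omega) (by omega) he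
        (fun i h1 h2 => by
          rcases Nat.lt_succ_iff_lt_or_eq.mp h2 with h | h
          · exact hinv i h1 h
          · subst h; intro hc; exact hpa ((hp i (by omega)).mpr hc))

-- ===== VERDICT (by name: the statement is the Claim_ definition above) =====
theorem find_occurences_spec : Claim_equal_find_occurences := by
  intro pattern text _ hpre
  have hp : pattern.toList ≠ [] := fun hn => hpre (String.toList_eq_nil_iff.mp hn)
  have hm : 0 < pattern.toList.length := List.length_pos_iff.mpr hp
  unfold Spec_find_occurences find_occurences find_occurences_alt
  simp only [PySem.Str.len_eq, foldl_greedy, List.nil_append]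
  -- B's match test, read at char level
  have hp' : ∀ k : Nat, (k : Int) < (text.toList.length : Int) - pattern.toList.length + 1 →
      ((PySem.Str.slice text (some (k : Int))
          (some ((k : Int) + (pattern.toList.length : Int))) == pattern) = true
        ↔ pattern.toList <+: text.toList.drop k) := by
    intro k hk
    have hsl2 : PySem.Chars.slice text.toList (some (k : Int))
        (some ((k : Int) + (pattern.toList.length : Int)))
          = List.take pattern.toList.length (List.drop k text.toList) :=
      PySem.List.slice_natCast_add text.toList k pattern.toList.length
    rw [beq_iff_eq]
    constructor
    · intro hsl
      have h1 := congrArg String.toList hsl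
      rw [PySem.Str.toList_slice, hsl2] at h1
      rw [List.prefix_iff_eq_take, ← h1]
      have hlen : pattern.toList.length ≤ (text.toList.drop k).length := by
        rw [List.length_drop]; omega
      rw [List.length_take, Nat.min_eq_left hlen]
    · intro hpre2
      apply String.toList_injective
      rw [PySem.Str.toList_slice, hsl2]
      exact (List.prefix_iff_eq_take.mp hpre2).symm
  -- kept = the occurrence sequence
  have hkept := greedy_eq_idxSeq pattern.toList text.toList hp
    (fun i => PySem.Str.slice text (some i) (some (i + (pattern.toList.length : Int))) == pattern)
    hp' (((text.toList.length : Int) - pattern.toList.length + 1) - 0).toNat 0 0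
    (text.toList.length + 1) rfl (by omega) (Nat.zero_le _) (fun i h1 h2 => absurd h2 (by omega))
  rw [show ((0 : Nat) : Int) = (0 : Int) from rfl] at hkept
  rw [hkept]
  -- unfold one step of the occurrence sequence and of A's loop
  simp only [find_occurencesGo, idxSeq, PySem.Str.findFrom_eq, PySem.Str.len_eq]
  by_cases h : PySem.Chars.findFrom text.toList pattern.toList (0 : Int) = -1
  · rw [if_pos h, if_pos h]; simp
  · rw [show (0 : Int) = ((0 : Nat) : Int) from rfl] at h
    obtain ⟨m0, hm0, hpos, hle⟩ := findFrom_step pattern text 0 (Nat.zero_le _) hp h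
    rw [show ((0 : Nat) : Int) = (0 : Int) from rfl] at h hm0
    rw [if_neg h, if_neg h, if_neg (fun hc => hc rfl), hm0]
    have hcast : ((m0 : Int) + (pattern.toList.length : Int))
        = ((m0 + pattern.toList.length : Nat) : Int) := by push_cast; ring
    rw [hcast, go_eq_segs pattern text hp _ (m0 + pattern.toList.length) hle hpos]
    simp only [List.nil_append, List.tail_cons]
    rw [← segsF_zip pattern text _ (m0 : Int), hcast]
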